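-- pv_equiv track=rewrite | github.com/medchaibi16/Job-Hunter | app/email_extractor.py | find_hiring_email
-- ===== SOURCE A (Python) =====
-- def find_hiring_email(emails, company_name):
--     """
--     Find the best email for hiring inquiries
--
--     Args:
--         emails: list of emails
--         company_name: company name for guessing patterns
--
--     Returns:
--         str: best email for hiring, or first email if none found
--     """
--     if not emails:
--         return None
--
--     # Priority keywords for hiring
--     hiring_keywords = [
--         'careers', 'jobs', 'hiring', 'hr', 'talent',
--         'recruit', 'internship', 'intern', 'people'
--     ]
--
--     # Check for hiring-related emails
--     for keyword in hiring_keywords: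
--         for email in emails:
--             if keyword in email.lower():
--                 return email
--
--     # Check for general contact emails
--     general_keywords = ['contact', 'info', 'hello', 'hi', 'team']
--     for keyword in general_keywords:
--         for email in emails:
--             if keyword in email.lower():
--                 return email
--
--     # Return first email as fallback
--     return emails[0]
-- ===== SOURCE B (Python) =====
-- def find_hiring_email(emails, company_name):
--     if not emails:
--         return None
--     keywords = [
--         'careers', 'jobs', 'hiring', 'hr', 'talent',
--         'recruit', 'internship', 'intern', 'people',
--         'contact', 'info', 'hello', 'hi', 'team',
--     ]
--     n = len(keywords)
--     best = None
--     best_rank = n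
--     for email in emails:
--         low = email.lower()
--         rank = next((i for i, k in enumerate(keywords) if k in low), n)
--         if rank < best_rank:
--             best, best_rank = email, rank
--     return best if best_rank < n else emails[0]
-- ===== Notes on version B (the rewrite author's own statement) =====
-- stated objective: alternative
-- what changed: Replaced the keyword-major nested scans (hiring then general) by a single email-major pass that computes each email's first-matching-keyword rank over one combined priority list and keeps the email with the strictly smallest rank.
import Mathlib
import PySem

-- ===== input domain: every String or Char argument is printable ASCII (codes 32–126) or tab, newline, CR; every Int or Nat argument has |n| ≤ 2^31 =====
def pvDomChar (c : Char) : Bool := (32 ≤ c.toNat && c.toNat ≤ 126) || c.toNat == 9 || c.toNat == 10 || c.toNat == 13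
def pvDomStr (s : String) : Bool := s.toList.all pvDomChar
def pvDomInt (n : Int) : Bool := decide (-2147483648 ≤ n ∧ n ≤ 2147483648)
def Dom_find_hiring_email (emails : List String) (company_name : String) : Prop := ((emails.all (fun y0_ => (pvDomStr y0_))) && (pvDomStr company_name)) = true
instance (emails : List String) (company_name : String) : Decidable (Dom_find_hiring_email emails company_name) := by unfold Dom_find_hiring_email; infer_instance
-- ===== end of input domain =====

-- B replaces A's keyword-major nested scans by one email-major pass keeping the
-- email of strictly smallest first-matching-keyword rank (alternative decomposition, not faster).

-- ===== PORT A =====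
-- 'keyword in email.lower()'
def pvMatch (k : String) (e : String) : Bool := PySem.Str.isIn k (PySem.Str.lower e)

def pvHiringKeywords : List String :=
  ["careers", "jobs", "hiring", "hr", "talent",
   "recruit", "internship", "intern", "people"]

def pvGeneralKeywords : List String := ["contact", "info", "hello", "hi", "team"]

-- the 'for keyword: for email: if …: return email' double loop
def pvScan (kws : List String) (emails : List String) : Option String :=
  kws.findSome? (fun k => emails.find? (fun e => pvMatch k e))

def find_hiring_email (emails : List String) (company_name : String) : Option String :=
  match emails with
  | [] => none
  | e0 :: _ =>
    match pvScan pvHiringKeywords emails with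
    | some e => some e
    | none =>
      match pvScan pvGeneralKeywords emails with
      | some e => some e
      | none => some e0          -- emails[0] fallback

-- ===== PORT B =====
def pvKeywords : List String :=
  ["careers", "jobs", "hiring", "hr", "talent",
   "recruit", "internship", "intern", "people",
   "contact", "info", "hello", "hi", "team"]

-- rank = next((i for i,k in enumerate(keywords) if k in low), n)
def pvRank (kws : List String) (e : String) : Nat :=
  kws.findIdx (fun k => pvMatch k e)

def find_hiring_email_alt (emails : List String) (company_name : String) : Option String :=
  match emails with
  | [] => none
  | e0 :: _ =>
    let n := pvKeywords.length
    let acc := emails.foldl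
      (fun (acc : Option String × Nat) e =>
        let r := pvRank pvKeywords e
        if r < acc.2 then (some e, r) else acc)
      (none, n)
    if acc.2 < n then acc.1 else some e0

-- ===== PRECONDITION & SPEC =====
def Spec_find_hiring_email (emails : List String) (company_name : String) (out : Option String) : Prop := out = find_hiring_email_alt emails company_name
instance (emails : List String) (company_name : String) (out : Option String) : Decidable (Spec_find_hiring_email emails company_name out) := by unfold Spec_find_hiring_email; infer_instance

-- ===== CLAIM (what is proved, stated in full; the proofs are below) =====
def Claim_equal_find_hiring_email : Prop := ∀ (emails : List String) (company_name : String), Dom_find_hiring_email emails company_name → Spec_find_hiring_email emails company_name (find_hiring_email emails company_name)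

-- ===== LEMMAS AND PROOFS =====

-- minimum rank of any email, with the number of keywords as the empty base
def pvMinRank (kws : List String) (es : List String) : Nat :=
  es.foldr (fun e m => min (pvRank kws e) m) kws.length

theorem pvRank_le (kws : List String) (e : String) : pvRank kws e ≤ kws.length :=
  List.findIdx_le_length

theorem pvMinRank_le (kws : List String) (es : List String) :
    pvMinRank kws es ≤ kws.length := by
  induction es with
  | nil => simp [pvMinRank]
  | cons e es ih => simpa [pvMinRank] using Or.inr ih

theorem pvMinRank_le_rank (kws : List String) {es : List String} {e : String}
    (h : e ∈ es) : pvMinRank kws es ≤ pvRank kws e := by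
  induction es with
  | nil => cases h
  | cons a es ih =>
    rcases List.mem_cons.mp h with h | h
    · simp [pvMinRank, h]
    · simpa [pvMinRank] using Or.inr (ih h)

theorem pvFind?_congr {α : Type} (l : List α) (p q : α → Bool)
    (h : ∀ a ∈ l, p a = q a) : l.find? p = l.find? q := by
  induction l with
  | nil => rfl
  | cons a l ih =>
    have ha := h a (by simp)
    simp only [List.find?_cons, ha]
    cases hq : q a with
    | true => rfl
    | false => exact ih (fun x hx => h x (List.mem_cons_of_mem _ hx))

-- shifting the keyword list by a non-matching keyword shifts every rank by one
theorem pvRank_cons_of_not (k : String) (kws : List String) (e : String)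
    (h : pvMatch k e = false) : pvRank (k :: kws) e = pvRank kws e + 1 := by
  simp [pvRank, List.findIdx_cons, h]

theorem pvMinRank_cons_of_not (k : String) (kws : List String) (es : List String)
    (h : ∀ e ∈ es, pvMatch k e = false) :
    pvMinRank (k :: kws) es = pvMinRank kws es + 1 := by
  induction es with
  | nil => simp [pvMinRank]
  | cons a es ih =>
    have ha := pvRank_cons_of_not k kws a (h a (by simp))
    have ih' := ih (fun e he => h e (by simp [he]))
    simp only [pvMinRank, List.foldr_cons] at *
    rw [ha, ih']
    omega

-- A-side characterisation: the keyword-major double loop returns the first email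
-- achieving the minimal rank (none if no keyword matches any email)
theorem pvScan_eq (kws : List String) (es : List String) :
    pvScan kws es =
      if pvMinRank kws es < kws.length
      then es.find? (fun e => pvRank kws e == pvMinRank kws es)
      else none := by
  induction kws generalizing es with
  | nil =>
    simp [pvScan]
  | cons k kws ih =>
    simp only [pvScan, List.findSome?_cons]
    cases hf : es.find? (fun e => pvMatch k e) with
    | some e =>
      have he : e ∈ es ∧ pvMatch k e = true := by
        constructor
        · exact List.mem_of_find?_eq_some hf
        · simpa using List.find?_some hf
      have hr0 : pvRank (k :: kws) e = 0 := by
        simp [pvRank, List.findIdx_cons, he.2]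
      have hm0 : pvMinRank (k :: kws) es = 0 :=
        Nat.le_antisymm (hr0 ▸ pvMinRank_le_rank (k :: kws) he.1) (Nat.zero_le _)
      have hcg : es.find? (fun e => pvRank (k :: kws) e == (0 : Nat))
           = es.find? (fun e => pvMatch k e) := by
        apply pvFind?_congr
        intro a _
        by_cases hpa : pvMatch k a = true
        · simp [pvRank, List.findIdx_cons, hpa]
        · simp [pvRank, List.findIdx_cons, eq_false_of_ne_true hpa]
      simp only [hf, hm0, hcg]
      simp
    | none =>
      have hnone : ∀ e ∈ es, pvMatch k e = false := by
        intro e he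
        have := List.find?_eq_none.mp hf e he
        exact eq_false_of_ne_true (fun h' => this h')
      have hshift := pvMinRank_cons_of_not k kws es hnone
      have ihe := ih es
      simp only [pvScan] at ihe
      simp only [ihe, hshift]
      by_cases hlt : pvMinRank kws es < kws.length
      · rw [if_pos hlt, if_pos (by simpa using hlt)]
        apply pvFind?_congr
        intro a ha
        rw [pvRank_cons_of_not k kws a (hnone a ha)]
        simp
      · rw [if_neg hlt, if_neg (by simpa using hlt)]

-- B-side characterisation of the strict-< argmin fold
theorem pvMinRank_cons (kws : List String) (a : String) (es : List String) :
    pvMinRank kws (a :: es) = min (pvRank kws a) (pvMinRank kws es) := rfl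

-- the minimum rank, when below the number of keywords, is attained by some email
theorem pvMinRank_attained (kws : List String) (es : List String)
    (h : pvMinRank kws es < kws.length) : ∃ e ∈ es, pvRank kws e = pvMinRank kws es := by
  induction es with
  | nil => simp [pvMinRank] at h
  | cons a es ih =>
    rw [pvMinRank_cons] at h ⊢
    by_cases hle : pvRank kws a ≤ pvMinRank kws es
    · exact ⟨a, by simp, (Nat.min_eq_left hle).symm⟩
    · have hm : min (pvRank kws a) (pvMinRank kws es) = pvMinRank kws es :=
        Nat.min_eq_right (Nat.le_of_not_le hle)
      rw [hm] at h ⊢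
      obtain ⟨e, he, hre⟩ := ih h
      exact ⟨e, by simp [he], hre⟩

-- B-side characterisation of the strict-< argmin fold
theorem pvFold_eq (kws : List String) (es : List String) (b : Option String) (r : Nat)
    (hr : r ≤ kws.length) :
    es.foldl
      (fun (acc : Option String × Nat) e =>
        let rr := pvRank kws e
        if rr < acc.2 then (some e, rr) else acc) (b, r)
    = ((if pvMinRank kws es < r
        then es.find? (fun e => pvRank kws e == pvMinRank kws es)
        else b),
       min (pvMinRank kws es) r) := by
  induction es generalizing b r with
  | nil =>
    simp [pvMinRank, Nat.min_eq_right hr, Nat.not_lt.mpr hr]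
  | cons a es ih =>
    rw [List.foldl_cons, pvMinRank_cons]
    by_cases hstep : pvRank kws a < r
    · simp only [hstep, if_pos]
      rw [ih (some a) (pvRank kws a) (pvRank_le kws a)]
      have hMr : min (pvRank kws a) (pvMinRank kws es) < r :=
        Nat.lt_of_le_of_lt (Nat.min_le_left _ _) hstep
      rw [if_pos hMr,
          Nat.min_eq_left (Nat.le_of_lt (Nat.lt_of_le_of_lt (Nat.min_le_left _ _) hstep))]
      by_cases hlt : pvMinRank kws es < pvRank kws a
      · have hb : (pvRank kws a == pvMinRank kws es) = false := by
          simp only [beq_eq_false_iff_ne, ne_eq]; omega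
        rw [if_pos hlt, Nat.min_eq_right (Nat.le_of_lt hlt), List.find?_cons, hb]
        simp [Nat.min_eq_left (Nat.le_of_lt hlt)]
      · have heq : min (pvRank kws a) (pvMinRank kws es) = pvRank kws a :=
          Nat.min_eq_left (Nat.le_of_not_lt hlt)
        rw [if_neg hlt, heq, List.find?_cons, beq_self_eq_true]
        simp [Nat.min_eq_right (Nat.le_of_not_lt hlt)]
    · simp only [hstep, if_false]
      rw [ih b r hr]
      have hra : r ≤ pvRank kws a := Nat.le_of_not_lt hstep
      by_cases hlt : pvMinRank kws es < r
      · have hM : min (pvRank kws a) (pvMinRank kws es) = pvMinRank kws es :=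
          Nat.min_eq_right (Nat.le_of_lt (Nat.lt_of_lt_of_le hlt hra))
        have hb : (pvRank kws a == pvMinRank kws es) = false := by
          simp only [beq_eq_false_iff_ne, ne_eq]
          have := Nat.lt_of_lt_of_le hlt hra
          omega
        rw [hM, if_pos hlt, if_pos hlt, List.find?_cons, hb]
      · have hM : r ≤ min (pvRank kws a) (pvMinRank kws es) :=
          Nat.le_min.mpr ⟨hra, Nat.le_of_not_lt hlt⟩
        rw [if_neg hlt, if_neg (Nat.not_lt.mpr hM), Nat.min_eq_right (Nat.le_of_not_lt hlt),
            Nat.min_eq_right hM]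

theorem pvKeywords_split : pvKeywords = pvHiringKeywords ++ pvGeneralKeywords := rfl

theorem pvScan_append (k1 k2 es : List String) :
    pvScan (k1 ++ k2) es =
      match pvScan k1 es with
      | some e => some e
      | none => pvScan k2 es := by
  simp only [pvScan, List.findSome?_append]
  cases k1.findSome? (fun k => es.find? (fun e => pvMatch k e)) <;> rfl

theorem find_hiring_email_spec : Claim_equal_find_hiring_email := by
  intro emails company_name _
  unfold Spec_find_hiring_email find_hiring_email find_hiring_email_alt
  cases emails with
  | nil => rfl
  | cons e0 rest =>
    simp only
    have hA : (match pvScan pvHiringKeywords (e0 :: rest) with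
              | some e => some e
              | none => match pvScan pvGeneralKeywords (e0 :: rest) with
                        | some e => some e
                        | none => some e0)
          = (match pvScan pvKeywords (e0 :: rest) with
             | some e => some e
             | none => some e0) := by
      rw [pvKeywords_split, pvScan_append]
      cases pvScan pvHiringKeywords (e0 :: rest) <;> rfl
    rw [hA, pvScan_eq, pvFold_eq pvKeywords (e0 :: rest) none pvKeywords.length (Nat.le_refl _)]
    by_cases hlt : pvMinRank pvKeywords (e0 :: rest) < pvKeywords.length
    · rw [if_pos hlt]
      simp only [Nat.min_eq_left (Nat.le_of_lt hlt), hlt, if_true]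
      obtain ⟨e, he, hre⟩ := pvMinRank_attained pvKeywords (e0 :: rest) hlt
      have hs : ((e0 :: rest).find?
          (fun e => pvRank pvKeywords e == pvMinRank pvKeywords (e0 :: rest))).isSome :=
        List.find?_isSome.mpr ⟨e, he, by simpa using hre⟩
      cases heq : (e0 :: rest).find?
          (fun e => pvRank pvKeywords e == pvMinRank pvKeywords (e0 :: rest)) with
      | some e' => rfl
      | none => rw [heq] at hs; simp at hs
    · have hge : pvMinRank pvKeywords (e0 :: rest) = pvKeywords.length :=
        Nat.le_antisymm (pvMinRank_le _ _) (Nat.le_of_not_lt hlt)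
      rw [if_neg hlt]
      simp [hge]
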